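-- pv_equiv track=rewrite | github.com/luiscg110/dataroom-mvp | backend/controllers/folders.py | next_collision_name
-- ===== SOURCE A (Python) =====
-- def next_collision_name(name: str, siblings: set[str]) -> str:
--     if name not in siblings:
--         return name
--     i = 1
--     stem, dot, ext = name.rpartition(".")
--     if not dot:
--         stem, ext = name, ""
--     base = stem
--     while True:
--         candidate = f"{base} ({i}){('.' + ext) if ext else ''}"
--         if candidate not in siblings:
--             return candidate
--         i += 1
-- ===== SOURCE B (Python) =====
-- def next_collision_name(name: str, siblings: set[str]) -> str:
--     if name not in siblings:
--         return name
--     stem, dot, ext = name.rpartition(".")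
--     if not dot:
--         stem, ext = name, ""
--     pre = stem + " ("
--     post = (")." + ext) if ext else ")"
--     mids = set()
--     for s in siblings:
--         if len(s) > len(pre) + len(post) and s.startswith(pre) and s.endswith(post):
--             mids.add(s[len(pre):len(s) - len(post)])
--     i = 1
--     while str(i) in mids:
--         i += 1
--     return f"{pre}{i}{post}"
-- ===== Notes on version B (the rewrite author's own statement) =====
-- stated objective: alternative
-- what changed: A generates candidate names 'base (1)', 'base (2)', ... and probes each against the sibling set until one is free; B makes a single pass over the siblings, collecting into a set the middle slice of every sibling shaped like 'base (<mid>)<suffix>', and then returns the first index i >= 1 whose decimal form is not in that collected set.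
import Mathlib
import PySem

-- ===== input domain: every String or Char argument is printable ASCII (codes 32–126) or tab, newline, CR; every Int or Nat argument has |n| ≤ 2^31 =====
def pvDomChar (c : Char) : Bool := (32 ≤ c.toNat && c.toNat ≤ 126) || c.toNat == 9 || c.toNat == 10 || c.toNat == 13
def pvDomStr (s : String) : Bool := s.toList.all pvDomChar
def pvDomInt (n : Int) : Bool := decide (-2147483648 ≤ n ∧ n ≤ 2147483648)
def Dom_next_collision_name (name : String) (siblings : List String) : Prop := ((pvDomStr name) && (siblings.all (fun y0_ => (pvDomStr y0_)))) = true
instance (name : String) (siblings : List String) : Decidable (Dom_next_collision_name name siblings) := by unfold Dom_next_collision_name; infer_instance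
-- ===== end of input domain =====

-- B replaces A's probe-every-candidate-against-the-set loop by one pass over the siblings that
-- collects the numeric-suffix middles matching the pattern, then scans for the first unused index;
-- objective: alternative (single pass over siblings + scan over the small middle set).

-- shared by both ports: Python's `stem, dot, ext = name.rpartition(".")` followed by
-- `if not dot: stem, ext = name, ""` — exact hand-port of rpartition via PySem.Chars.rfind
-- (rfind = index of last occurrence, -1 if absent; rpartition returns ('', '', name) when absent).
def pvBaseExt (n : List Char) : List Char × List Char :=
  let r := PySem.Chars.rfind n ['.']
  if r = -1 then (n, [])
  else (n.take r.toNat, n.drop (r.toNat + 1))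

-- ===== PORT A =====
-- A's `while True` loop, made total with a fuel guard (fuel siblings.length + 1 always suffices,
-- proved below; the fuel-0 default is never reached).
def pvLoopA (sibs : List (List Char)) (base sfx : List Char) (i : Int) : Nat → List Char
  | 0 => base ++ [' ', '('] ++ PySem.Int.toChars i ++ [')'] ++ sfx
  | f + 1 =>
    let candidate := base ++ [' ', '('] ++ PySem.Int.toChars i ++ [')'] ++ sfx
    if sibs.contains candidate then pvLoopA sibs base sfx (i + 1) f else candidate

def next_collision_name (name : String) (siblings : List String) : String :=
  let sibs := siblings.map String.toList
  if sibs.contains name.toList = false then name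
  else
    let (stem, ext) := pvBaseExt name.toList
    let base := stem
    let sfx := if ext = [] then [] else '.' :: ext
    String.ofList (pvLoopA sibs base sfx 1 (sibs.length + 1))

-- ===== PORT B =====
-- one pass over siblings collecting every middle slice s[len(pre) : len(s)-len(post)] of a sibling
-- shaped pre ++ middle ++ post with nonempty middle (the drop/take equals the Python slice here,
-- PySem.List.slice_natCast); `mids` is a Python set, built with PySem.Set.add.
def pvMids (pre post : List Char) (sibs : List (List Char)) : PySem.Set (List Char) :=
  sibs.foldl (fun u s =>
    if decide (pre.length + post.length < s.length) && PySem.Chars.startswith s pre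
        && PySem.Chars.endswith s post
    then u.add ((s.drop pre.length).take (s.length - post.length - pre.length))
    else u) []

-- B's `while str(i) in mids` loop, fuel mids.length + 1 (always sufficient, proved below).
def pvLoopB (mids : List (List Char)) (i : Int) : Nat → Int
  | 0 => i
  | f + 1 => if mids.contains (PySem.Int.toChars i) then pvLoopB mids (i + 1) f else i

def next_collision_name_alt (name : String) (siblings : List String) : String :=
  let sibs := siblings.map String.toList
  if sibs.contains name.toList = false then name
  else
    let (stem, ext) := pvBaseExt name.toList
    let pre := stem ++ [' ', '(']
    let post := if ext = [] then [')'] else [')', '.'] ++ ext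
    let mids := pvMids pre post sibs
    String.ofList (pre ++ PySem.Int.toChars (pvLoopB mids 1 (mids.length + 1)) ++ post)

-- ===== PRECONDITION & SPEC =====
def Spec_next_collision_name (name : String) (siblings : List String) (out : String) : Prop := out = next_collision_name_alt name siblings
instance (name : String) (siblings : List String) (out : String) : Decidable (Spec_next_collision_name name siblings out) := by unfold Spec_next_collision_name; infer_instance

-- ===== CLAIM (what is proved, stated in full; the proofs are below) =====
def Claim_equal_next_collision_name : Prop := ∀ (name : String) (siblings : List String), Dom_next_collision_name name siblings → Spec_next_collision_name name siblings (next_collision_name name siblings)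

-- ===== LEMMAS AND PROOFS =====

/-! decimal digits: `PySem.Int.toChars` on a nonnegative number is this plain recursion,
which is injective. -/

def pvRec10 (n : Nat) : List Char :=
  if h : n < 10 then [Nat.digitChar n]
  else pvRec10 (n / 10) ++ [Nat.digitChar (n % 10)]
decreasing_by exact Nat.div_lt_self (by omega) (by norm_num)

lemma pvToDigitsCore_eq : ∀ (f n : Nat) (acc : List Char), n < f →
    Nat.toDigitsCore 10 f n acc = pvRec10 n ++ acc := by
  intro f
  induction f with
  | zero => intro n acc h; omega
  | succ f ih =>
    intro n acc h
    rw [Nat.toDigitsCore]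
    by_cases h10 : n / 10 = 0
    · have hn : n < 10 := by omega
      rw [if_pos h10, pvRec10, dif_pos hn, Nat.mod_eq_of_lt hn]
      simp
    · have hn : ¬ n < 10 := by omega
      have hlt : n / 10 < f := by
        have := Nat.div_lt_self (by omega : 0 < n) (by norm_num : 1 < 10)
        omega
      rw [if_neg h10, ih (n / 10) _ hlt]
      conv_rhs => rw [pvRec10, dif_neg hn]
      simp

lemma pvToChars_natCast (n : Nat) : PySem.Int.toChars (n : Int) = pvRec10 n := by
  have : Nat.toDigits 10 n = pvRec10 n := by
    have := pvToDigitsCore_eq (n + 1) n [] (by omega)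
    simpa [Nat.toDigits] using this
  simp [PySem.Int.toChars, this]

lemma pvRec10_ne_nil (n : Nat) : pvRec10 n ≠ [] := by
  rw [pvRec10]; split <;> simp

lemma pvDigitChar_inj (a b : Nat) (ha : a < 10) (hb : b < 10)
    (h : Nat.digitChar a = Nat.digitChar b) : a = b := by
  interval_cases a <;> interval_cases b <;> revert h <;> decide

lemma pvRec10_lt (n : Nat) (h : n < 10) : pvRec10 n = [Nat.digitChar n] := by
  rw [pvRec10, dif_pos h]

lemma pvRec10_ge (n : Nat) (h : ¬ n < 10) :
    pvRec10 n = pvRec10 (n / 10) ++ [Nat.digitChar (n % 10)] := by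
  conv_lhs => rw [pvRec10, dif_neg h]

lemma pvRec10_inj : ∀ a b : Nat, pvRec10 a = pvRec10 b → a = b := by
  intro a
  induction a using Nat.strong_induction_on with
  | _ a ih =>
    intro b h
    by_cases ha : a < 10 <;> by_cases hb : b < 10
    · rw [pvRec10_lt a ha, pvRec10_lt b hb] at h
      exact pvDigitChar_inj a b ha hb (List.singleton_inj.mp h)
    · rw [pvRec10_lt a ha, pvRec10_ge b hb] at h
      have hlen := congrArg List.length h
      rw [List.length_append, List.length_singleton, List.length_singleton] at hlen
      exact absurd (List.eq_nil_of_length_eq_zero (by omega)) (pvRec10_ne_nil (b / 10))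
    · rw [pvRec10_ge a ha, pvRec10_lt b hb] at h
      have hlen := congrArg List.length h
      rw [List.length_append, List.length_singleton, List.length_singleton] at hlen
      exact absurd (List.eq_nil_of_length_eq_zero (by omega)) (pvRec10_ne_nil (a / 10))
    · rw [pvRec10_ge a ha, pvRec10_ge b hb] at h
      obtain ⟨h1, h2⟩ := List.append_singleton_inj.mp h
      have e1 : a / 10 = b / 10 :=
        ih (a / 10) (Nat.div_lt_self (by omega) (by norm_num)) _ h1
      have e2 : a % 10 = b % 10 :=
        pvDigitChar_inj _ _ (Nat.mod_lt _ (by norm_num)) (Nat.mod_lt _ (by norm_num)) h2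
      omega

/-! shape decomposition: a sibling matches (pre, post) iff it is pre ++ m ++ post with m ≠ []. -/

def pvShape (pre post s : List Char) : Bool :=
  decide (pre.length + post.length < s.length) && PySem.Chars.startswith s pre
    && PySem.Chars.endswith s post

def pvMidOf (pre post s : List Char) : List Char :=
  (s.drop pre.length).take (s.length - post.length - pre.length)

def pvCand (pre post : List Char) (i : Int) : List Char := pre ++ PySem.Int.toChars i ++ post

lemma pvSuffixOfAppend (pre t post : List Char) (h : post <:+ pre ++ t)
    (hl : post.length ≤ t.length) : post <:+ t := by
  rw [List.suffix_iff_eq_drop] at h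
  rw [List.suffix_iff_eq_drop, h, List.drop_append]
  have h1 : (pre ++ t).length - post.length - pre.length = t.length - post.length := by
    simp [List.length_append]; omega
  rw [List.drop_of_length_le (by simp [List.length_append]; omega), h1]
  simp
  omega

lemma pvDecomp (pre post s : List Char) (h : pvShape pre post s = true) :
    s = pre ++ pvMidOf pre post s ++ post := by
  simp only [pvShape, Bool.and_eq_true, decide_eq_true_eq, PySem.Chars.startswith_iff,
    PySem.Chars.endswith_iff] at h
  obtain ⟨⟨hlen, t, ht⟩, hsuf⟩ := h
  subst ht
  have hlt : post.length ≤ t.length := by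
    rw [List.length_append] at hlen; omega
  obtain ⟨w, hw⟩ := pvSuffixOfAppend pre t post hsuf hlt
  have hmid : pvMidOf pre post (pre ++ t) = w := by
    unfold pvMidOf
    rw [List.drop_left, ← hw]
    have hwl : (pre ++ (w ++ post)).length - post.length - pre.length = w.length := by
      simp [List.length_append]; omega
    rw [hwl, List.take_left]
  rw [hmid, ← hw, List.append_assoc]

lemma pvMid_cand (pre post m : List Char) : pvMidOf pre post (pre ++ m ++ post) = m := by
  unfold pvMidOf
  rw [List.append_assoc, List.drop_left]
  have hl : (pre ++ (m ++ post)).length - post.length - pre.length = m.length := by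
    simp [List.length_append]; omega
  rw [hl, List.take_left]

lemma pvShape_cand (pre post m : List Char) (hm : m ≠ []) :
    pvShape pre post (pre ++ m ++ post) = true := by
  have hml : 0 < m.length := List.length_pos_of_ne_nil hm
  simp only [pvShape, Bool.and_eq_true, decide_eq_true_eq, PySem.Chars.startswith_iff,
    PySem.Chars.endswith_iff]
  refine ⟨⟨by simp [List.length_append]; omega, ?_⟩, ?_⟩
  · rw [List.append_assoc]; exact List.prefix_append pre (m ++ post)
  · exact List.suffix_append (pre ++ m) post

/-! the middle set collects exactly the middles of matching siblings. -/

lemma pvMids_eq_foldl (pre post : List Char) (sibs : List (List Char)) :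
    pvMids pre post sibs = sibs.foldl (fun u s =>
      if pvShape pre post s then PySem.Set.add u (pvMidOf pre post s) else u)
      ([] : PySem.Set (List Char)) := rfl

lemma pvMem_mids_aux (pre post : List Char) : ∀ (sibs : List (List Char))
    (u : PySem.Set (List Char)) (m : List Char),
    m ∈ sibs.foldl (fun u s =>
        if pvShape pre post s then PySem.Set.add u (pvMidOf pre post s) else u) u ↔
      m ∈ u ∨ ∃ s ∈ sibs, pvShape pre post s = true ∧ pvMidOf pre post s = m := by
  intro sibs
  induction sibs with
  | nil => simp
  | cons a l ih =>
    intro u m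
    rw [List.foldl_cons, ih]
    by_cases hsh : pvShape pre post a = true
    · rw [if_pos hsh, PySem.Set.mem_add]
      simp only [List.mem_cons]
      constructor
      · rintro (⟨h | h⟩ | ⟨s, hs, h1, h2⟩)
        · exact Or.inl h
        · exact Or.inr ⟨a, Or.inl rfl, hsh, h.symm⟩
        · exact Or.inr ⟨s, Or.inr hs, h1, h2⟩
      · rintro (h | ⟨s, (rfl | hs), h1, h2⟩)
        · exact Or.inl (Or.inl h)
        · exact Or.inl (Or.inr h2.symm)
        · exact Or.inr ⟨s, hs, h1, h2⟩
    · rw [if_neg hsh]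
      simp only [List.mem_cons]
      constructor
      · rintro (h | ⟨s, hs, h1, h2⟩)
        · exact Or.inl h
        · exact Or.inr ⟨s, Or.inr hs, h1, h2⟩
      · rintro (h | ⟨s, (rfl | hs), h1, h2⟩)
        · exact Or.inl h
        · exact absurd h1 hsh
        · exact Or.inr ⟨s, hs, h1, h2⟩

lemma pvMem_mids (pre post : List Char) (sibs : List (List Char)) (m : List Char) :
    m ∈ pvMids pre post sibs ↔ ∃ s ∈ sibs, pvShape pre post s = true ∧ pvMidOf pre post s = m := by
  rw [pvMids_eq_foldl, pvMem_mids_aux]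
  simp

/-! A's probe and B's membership test agree. -/

lemma pvPQ (pre post : List Char) (sibs : List (List Char)) (i : Int) (hi : 1 ≤ i) :
    sibs.contains (pvCand pre post i) = List.contains (pvMids pre post sibs) (PySem.Int.toChars i) := by
  have htc : PySem.Int.toChars i ≠ [] := by
    rw [← Int.toNat_of_nonneg (by omega : (0:Int) ≤ i), pvToChars_natCast]
    exact pvRec10_ne_nil _
  rw [Bool.eq_iff_iff]
  simp only [List.contains_iff_mem]
  rw [pvMem_mids]
  constructor
  · intro hmem
    exact ⟨pvCand pre post i, hmem, pvShape_cand pre post _ htc, pvMid_cand pre post _⟩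
  · rintro ⟨s, hs, hsh, hmid⟩
    have := pvDecomp pre post s hsh
    rw [hmid] at this
    rw [pvCand, ← this]
    exact hs

/-! the generic fuel scan both loops reduce to. -/

def pvScan (p : Int → Bool) (i : Int) : Nat → Int
  | 0 => i
  | f + 1 => if p i then pvScan p (i + 1) f else i

lemma pvLoopA_eq_scan (sibs : List (List Char)) (base sfx : List Char) (i : Int) (f : Nat) :
    pvLoopA sibs base sfx i f =
      pvCand (base ++ [' ', '(']) ([')'] ++ sfx)
        (pvScan (fun j => sibs.contains (pvCand (base ++ [' ', '(']) ([')'] ++ sfx) j)) i f) := by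
  have hc : ∀ j : Int, base ++ [' ', '('] ++ PySem.Int.toChars j ++ [')'] ++ sfx =
      pvCand (base ++ [' ', '(']) ([')'] ++ sfx) j := by
    intro j; simp [pvCand]
  induction f generalizing i with
  | zero => rw [pvLoopA, pvScan, hc]
  | succ f ih =>
    rw [pvLoopA, pvScan]
    simp only [hc]
    split
    · exact ih (i + 1)
    · rfl

lemma pvLoopB_eq_scan (mids : List (List Char)) (i : Int) (f : Nat) :
    pvLoopB mids i f = pvScan (fun j => mids.contains (PySem.Int.toChars j)) i f := by
  induction f generalizing i with
  | zero => rw [pvLoopB, pvScan]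
  | succ f ih =>
    rw [pvLoopB, pvScan]
    split
    · exact ih (i + 1)
    · rfl

lemma pvScan_stop (p : Int → Bool) : ∀ (f : Nat) (i : Int) (k : Nat), k < f →
    p (i + (k : Int)) = false → (∀ m : Nat, m < k → p (i + (m : Int)) = true) →
    pvScan p i f = i + (k : Int) := by
  intro f
  induction f with
  | zero => intro i k hk; omega
  | succ f ih =>
    intro i k hk hfalse hall
    rw [pvScan]
    cases k with
    | zero =>
      simp only [Nat.cast_zero, add_zero] at hfalse ⊢
      rw [hfalse]
      simp
    | succ m =>
      have h0 : p i = true := by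
        have := hall 0 (by omega)
        simpa using this
      rw [h0]
      simp only [if_true]
      have := ih (i + 1) m (by omega)
        (by rw [show i + 1 + (m : Int) = i + ((m + 1 : Nat) : Int) by push_cast; ring]; exact hfalse)
        (fun j hj => by
          rw [show i + 1 + (j : Int) = i + ((j + 1 : Nat) : Int) by push_cast; ring]
          exact hall (j + 1) (by omega))
      rw [this]
      push_cast
      ring

lemma pvNodupSubsetLen {α : Type} [DecidableEq α] (l₁ l₂ : List α)
    (h : l₁.Nodup) (hs : l₁ ⊆ l₂) : l₁.length ≤ l₂.length := by
  calc l₁.length = l₁.toFinset.card := (List.toFinset_card_of_nodup h).symm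
    _ ≤ l₂.toFinset.card :=
        Finset.card_le_card (fun x hx => List.mem_toFinset.2 (hs (List.mem_toFinset.1 hx)))
    _ ≤ l₂.length := l₂.toFinset_card_le

/-- pigeonhole: an injective stream 1, 2, … cannot keep landing in a fixed list. -/
lemma pvPigeon {α : Type} [DecidableEq α] (F : Int → α)
    (hinj : ∀ a b : Nat, F (1 + (a : Int)) = F (1 + (b : Int)) → a = b)
    (l : List α) (hmem : ∀ k : Nat, k < l.length + 1 → F (1 + (k : Int)) ∈ l) : False := by
  set L := (List.range (l.length + 1)).map (fun k : Nat => F (1 + (k : Int))) with hL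
  have hnodup : L.Nodup :=
    List.Nodup.map (fun a b h => hinj a b h) (List.nodup_range)
  have hsub : L ⊆ l := by
    intro x hx
    rw [hL, List.mem_map] at hx
    obtain ⟨k, hk, rfl⟩ := hx
    exact hmem k (List.mem_range.mp hk)
  have := pvNodupSubsetLen L l hnodup hsub
  rw [hL] at this
  simp at this

/-- hence a free index exists, and the first one is below length + 1. -/
lemma pvFindBound {α : Type} [BEq α] [LawfulBEq α] [DecidableEq α] (F : Int → α)
    (hinj : ∀ a b : Nat, F (1 + (a : Int)) = F (1 + (b : Int)) → a = b) (l : List α) :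
    ∃ k : Nat, k < l.length + 1 ∧ l.contains (F (1 + (k : Int))) = false ∧
      ∀ m : Nat, m < k → l.contains (F (1 + (m : Int))) = true := by
  have hQ : ∃ k : Nat, l.contains (F (1 + (k : Int))) = false := by
    by_contra hno
    push_neg at hno
    refine pvPigeon F hinj l (fun k _ => ?_)
    rw [← List.contains_iff_mem]
    exact eq_true_of_ne_false (hno k)
  refine ⟨Nat.find hQ, ?_, Nat.find_spec hQ, fun m hm => ?_⟩
  · by_contra hbig
    push_neg at hbig
    refine pvPigeon F hinj l (fun k hk => ?_)
    rw [← List.contains_iff_mem]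
    refine eq_true_of_ne_false (fun hfk => ?_)
    have := Nat.find_min' hQ hfk
    omega
  · exact eq_true_of_ne_false (Nat.find_min hQ hm)

-- ===== VERDICT (by name: the statement is the Claim_ definition above) =====
theorem next_collision_name_spec : Claim_equal_next_collision_name := by
  intro name siblings _
  unfold Spec_next_collision_name next_collision_name next_collision_name_alt
  set sibs := siblings.map String.toList with hsibs
  by_cases hc : sibs.contains name.toList = false
  · simp only [if_pos hc]
  · simp only [if_neg hc]
    rcases hbe : pvBaseExt name.toList with ⟨stem, ext⟩
    set pre := stem ++ [' ', '('] with hpre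
    set post : List Char := (if ext = [] then [')'] else [')', '.'] ++ ext) with hpost
    set mids := pvMids pre post sibs with hmids
    have hps : [')'] ++ (if ext = [] then ([] : List Char) else '.' :: ext) = post := by
      rw [hpost]; split <;> rfl
    rw [pvLoopA_eq_scan, pvLoopB_eq_scan]
    rw [hps]
    have hinjB : ∀ a b : Nat,
        PySem.Int.toChars (1 + (a : Int)) = PySem.Int.toChars (1 + (b : Int)) → a = b := by
      intro a b h
      rw [show (1 + (a : Int)) = ((1 + a : Nat) : Int) by push_cast; ring,
          show (1 + (b : Int)) = ((1 + b : Nat) : Int) by push_cast; ring,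
          pvToChars_natCast, pvToChars_natCast] at h
      have := pvRec10_inj _ _ h
      omega
    have hinjA : ∀ a b : Nat,
        pvCand pre post (1 + (a : Int)) = pvCand pre post (1 + (b : Int)) → a = b := by
      intro a b h
      unfold pvCand at h
      have h1 := List.append_cancel_right h
      have h2 := List.append_cancel_left h1
      exact hinjB a b h2
    obtain ⟨kA, hkA, hfA, hmA⟩ := pvFindBound (pvCand pre post) hinjA sibs
    obtain ⟨kB, hkB, hfB, hmB⟩ := pvFindBound PySem.Int.toChars hinjB mids
    have hPQ : ∀ k : Nat, sibs.contains (pvCand pre post (1 + (k : Int))) =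
        List.contains mids (PySem.Int.toChars (1 + (k : Int))) := by
      intro k
      exact pvPQ pre post sibs _ (by omega)
    have hkk : kA = kB := by
      rcases lt_trichotomy kA kB with h | h | h
      · have hmem := hmB kA h
        rw [← hPQ, hfA] at hmem
        exact absurd hmem (by simp)
      · exact h
      · have hmem := hmA kB h
        rw [hPQ, hfB] at hmem
        exact absurd hmem (by simp)
    have hsA : pvScan (fun j => sibs.contains (pvCand pre post j)) 1 (sibs.length + 1) =
        1 + (kA : Int) :=
      pvScan_stop _ _ _ _ hkA hfA hmA
    have hsB : pvScan (fun j => List.contains mids (PySem.Int.toChars j)) 1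
        (List.length mids + 1) = 1 + (kB : Int) :=
      pvScan_stop _ _ _ _ hkB hfB hmB
    rw [hsA, hsB, hkk, pvCand]
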